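-- pv_equiv track=rewrite | github.com/geohyub/MBESQC | mbes_qc/report.py | _aggregate_overall_verdict
-- ===== SOURCE A (Python) =====
-- def _aggregate_overall_verdict(verdicts: list[str]) -> str:
--     overall = "N/A"
--     seen_real_verdict = False
--     for verdict in verdicts:
--         verdict_text = str(verdict or "").upper()
--         if verdict_text not in ("PASS", "WARNING", "FAIL"):
--             continue
--         seen_real_verdict = True
--         if verdict_text == "FAIL":
--             return "FAIL"
--         if verdict_text == "WARNING":
--             overall = "WARNING"
--         elif overall == "N/A":
--             overall = "PASS"
--     return overall if seen_real_verdict else "N/A"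
-- ===== SOURCE B (Python) =====
-- def _aggregate_overall_verdict(verdicts: list[str]) -> str:
--     real = {t for t in (str(v or "").upper() for v in verdicts)
--             if t in ("PASS", "WARNING", "FAIL")}
--     if not real:
--         return "N/A"
--     if "FAIL" in real:
--         return "FAIL"
--     if "WARNING" in real:
--         return "WARNING"
--     return "PASS"
-- ===== Notes on version B (the rewrite author's own statement) =====
-- stated objective: simpler
-- what changed: Replaced the single-pass state machine (running 'overall' plus a seen-flag and an early return) by a build-then-classify decomposition: collect the normalized recognized verdicts into a set, then decide by precedence with plain membership tests.
import Mathlib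
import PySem

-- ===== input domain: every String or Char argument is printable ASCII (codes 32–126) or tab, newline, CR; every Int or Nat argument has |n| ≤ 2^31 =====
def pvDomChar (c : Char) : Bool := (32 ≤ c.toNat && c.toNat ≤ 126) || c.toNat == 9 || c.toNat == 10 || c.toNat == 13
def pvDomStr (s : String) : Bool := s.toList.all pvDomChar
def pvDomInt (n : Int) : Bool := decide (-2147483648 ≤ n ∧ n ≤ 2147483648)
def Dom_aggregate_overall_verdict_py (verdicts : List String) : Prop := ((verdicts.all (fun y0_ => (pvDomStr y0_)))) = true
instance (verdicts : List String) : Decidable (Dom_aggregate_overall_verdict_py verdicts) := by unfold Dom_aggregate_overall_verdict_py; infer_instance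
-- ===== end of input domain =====

-- ===== PORT A =====
-- A: one-pass state machine with an early return on FAIL, a running 'overall' and a seen-flag.
def aggLoopA : List String → String → Bool → String
  | [], overall, seen => if seen then overall else "N/A"
  | v :: rest, overall, seen =>
    let t := PySem.Str.upper (if v == "" then "" else v)
    if !(t == "PASS" || t == "WARNING" || t == "FAIL") then aggLoopA rest overall seen
    else if t == "FAIL" then "FAIL"
    else if t == "WARNING" then aggLoopA rest "WARNING" true
    else if overall == "N/A" then aggLoopA rest "PASS" true
    else aggLoopA rest overall true

def aggregate_overall_verdict_py (verdicts : List String) : String :=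
  aggLoopA verdicts "N/A" false

-- ===== PORT B =====
-- B: build the set of normalized recognized verdicts, then classify by precedence membership tests.
def aggUp (v : String) : String := PySem.Str.upper (if v == "" then "" else v)

def aggregate_overall_verdict_py_alt (verdicts : List String) : String :=
  let real : PySem.Set String :=
    PySem.Set.ofList ((verdicts.map aggUp).filter
      (fun t => t == "PASS" || t == "WARNING" || t == "FAIL"))
  if real.isEmpty then "N/A"
  else if PySem.Set.contains real "FAIL" then "FAIL"
  else if PySem.Set.contains real "WARNING" then "WARNING"
  else "PASS"

-- ===== PRECONDITION & SPEC =====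
def Spec_aggregate_overall_verdict_py (verdicts : List String) (out : String) : Prop := out = aggregate_overall_verdict_py_alt verdicts
instance (verdicts : List String) (out : String) : Decidable (Spec_aggregate_overall_verdict_py verdicts out) := by unfold Spec_aggregate_overall_verdict_py; infer_instance

-- ===== CLAIM (what is proved, stated in full; the proofs are below) =====
def Claim_equal_aggregate_overall_verdict_py : Prop := ∀ (verdicts : List String), Dom_aggregate_overall_verdict_py verdicts → Spec_aggregate_overall_verdict_py verdicts (aggregate_overall_verdict_py verdicts)

-- ===== LEMMAS AND PROOFS =====

def aggFilt (verdicts : List String) : List String :=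
  (verdicts.map aggUp).filter (fun t => t == "PASS" || t == "WARNING" || t == "FAIL")

lemma agg_ofList_contains (L : List String) (x : String) :
    PySem.Set.contains (PySem.Set.ofList L) x = L.contains x := by
  simp [PySem.Set.contains, PySem.Set.mem_ofList]

lemma agg_ofList_isEmpty (L : List String) :
    (PySem.Set.ofList L : List String).isEmpty = L.isEmpty := by
  have : (PySem.Set.ofList L : List String) = [] ↔ L = [] := by
    constructor
    · intro h
      rw [List.eq_nil_iff_forall_not_mem] at h ⊢
      intro x hx
      exact h x ((PySem.Set.mem_ofList L x).mpr hx)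
    · intro h; subst h; rfl
  rcases h : L.isEmpty with _ | _
  · rw [List.isEmpty_eq_false_iff] at h
    simp [List.isEmpty_eq_false_iff, this, h]
  · rw [List.isEmpty_iff] at h
    simp [List.isEmpty_iff, this, h]

lemma agg_alt_eq (verdicts : List String) :
    aggregate_overall_verdict_py_alt verdicts =
      (if (aggFilt verdicts).isEmpty then "N/A"
       else if (aggFilt verdicts).contains "FAIL" then "FAIL"
       else if (aggFilt verdicts).contains "WARNING" then "WARNING"
       else "PASS") := by
  simp only [aggregate_overall_verdict_py_alt, aggFilt,
    agg_ofList_contains, agg_ofList_isEmpty]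
  rfl

lemma aggFilt_cons (v : String) (rest : List String) :
    aggFilt (v :: rest) =
      (if (aggUp v == "PASS" || aggUp v == "WARNING" || aggUp v == "FAIL") then
        aggUp v :: aggFilt rest else aggFilt rest) := by
  simp only [aggFilt, List.map_cons, List.filter_cons]

-- loop with state overall="PASS"/"WARNING", seen=true
lemma aggLoopA_seen (xs : List String) :
    (aggLoopA xs "PASS" true =
       (if (aggFilt xs).contains "FAIL" then "FAIL"
        else if (aggFilt xs).contains "WARNING" then "WARNING" else "PASS")) ∧
    (aggLoopA xs "WARNING" true =
       (if (aggFilt xs).contains "FAIL" then "FAIL" else "WARNING")) := by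
  induction xs with
  | nil => simp [aggLoopA, aggFilt]
  | cons v rest ih =>
    rw [aggFilt_cons]
    by_cases hF : aggUp v = "FAIL"
    · constructor <;> simp [aggLoopA, aggUp] at hF ⊢ <;> simp [hF, aggLoopA]
    · by_cases hW : aggUp v = "WARNING"
      · constructor <;> simp [aggLoopA, aggUp] at hW ⊢ <;>
          simp [hW, aggLoopA, hF, ih.2, aggUp]
      · by_cases hP : aggUp v = "PASS"
        · constructor <;> simp [aggLoopA, aggUp] at hP ⊢ <;>
            simp [hP, aggLoopA, hF, hW, ih.1, ih.2, aggUp]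
        · constructor <;> simp [aggLoopA, aggUp] at hF hW hP ⊢ <;>
            simp [aggLoopA, hF, hW, hP, ih.1, ih.2, aggUp]

lemma aggLoopA_start (xs : List String) :
    aggLoopA xs "N/A" false =
      (if (aggFilt xs).isEmpty then "N/A"
       else if (aggFilt xs).contains "FAIL" then "FAIL"
       else if (aggFilt xs).contains "WARNING" then "WARNING"
       else "PASS") := by
  induction xs with
  | nil => simp [aggLoopA, aggFilt]
  | cons v rest ih =>
    rw [aggFilt_cons]
    by_cases hF : aggUp v = "FAIL"
    · simp [aggLoopA, aggUp] at hF ⊢; simp [hF, aggLoopA]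
    · by_cases hW : aggUp v = "WARNING"
      · simp [aggLoopA, aggUp] at hW ⊢
        simp [hW, aggLoopA, hF, (aggLoopA_seen rest).2, aggUp]
      · by_cases hP : aggUp v = "PASS"
        · simp [aggLoopA, aggUp] at hP ⊢
          simp [hP, aggLoopA, hF, hW, (aggLoopA_seen rest).1, aggUp]
        · simp [aggLoopA, aggUp] at hF hW hP ⊢
          simp [aggLoopA, hF, hW, hP, ih, aggUp]

-- ===== VERDICT (by name: the statement is the Claim_ definition above) =====
theorem aggregate_overall_verdict_py_spec : Claim_equal_aggregate_overall_verdict_py := by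
  intro verdicts _
  unfold Spec_aggregate_overall_verdict_py aggregate_overall_verdict_py
  rw [agg_alt_eq, aggLoopA_start]
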